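-- pv_equiv track=rewrite | github.com/boostcampwm-2021-iOS10-Jipjung/Study-Algorithm | S034/211215/괄호_변환.py | solution
-- ===== SOURCE A (Python) =====
-- def bracket_to_int(bracket):
--     return 1 if bracket == "(" else -1
--
-- def int_to_bracket(_int):
--     return "(" if _int == 1 else ")"
--
-- def split_to_balanced(w):
--     if len(w) == 0:
--         return "", ""
--     u_count = bracket_to_int(w[0])
--     i = 0
--     for j in range(1, len(w)):
--         i = j
--         u_count += bracket_to_int(w[i])
--         if u_count == 0:
--             break
--     return w[:i + 1], w[i + 1:]
--
-- def check_balanced_is_perfect(u):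
--     stack = []
--     for char in u:
--         if bracket_to_int(char) == 1:
--             stack.append(1)
--         else:
--             if len(stack) == 0:
--                 return False
--             stack.pop()
--     return True
--
-- def reverse_all_character(u):
--     result = ""
--     for bracket in u:
--         _int = bracket_to_int(bracket)
--         reverse_bracket = int_to_bracket(-1 * _int)
--         result += reverse_bracket
--     return result
--
-- def solution(w):
--     answer = ''
--     if len(w) == 0:
--         return answer
--
--     u, v = split_to_balanced(w)
--     if check_balanced_is_perfect(u):
--         return u + solution(v)
--     return "(" + solution(v) + ")" + reverse_all_character(u[1:-1])
-- ===== SOURCE B (Python) =====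
-- def solution(w):
--     # Iterative: peel balanced chunks left-to-right, then fold them back-to-front.
--     chunks = []
--     while w:
--         k = len(w)
--         total = 0
--         for idx, ch in enumerate(w):
--             total += 1 if ch == "(" else -1
--             if idx >= 1 and total == 0:
--                 k = idx + 1
--                 break
--         u, w = w[:k], w[k:]
--         s = 0
--         perfect = True
--         for ch in u:
--             s += 1 if ch == "(" else -1
--             if s < 0:
--                 perfect = False
--                 break
--         chunks.append((u, perfect))
--     res = ""
--     for u, perfect in reversed(chunks):
--         if perfect:
--             res = u + res
--         else:
--             res = "(" + res + ")" + "".join(")" if c == "(" else "(" for c in u[1:-1])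
--     return res
-- ===== Notes on version B (the rewrite author's own statement) =====
-- stated objective: alternative
-- what changed: Replaces A's recursion with an iterative loop that collects (chunk, perfect?) pairs left-to-right and then folds them back-to-front into the answer, checking perfectness by an early-exiting running prefix sum instead of a stack list.
import Mathlib
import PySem

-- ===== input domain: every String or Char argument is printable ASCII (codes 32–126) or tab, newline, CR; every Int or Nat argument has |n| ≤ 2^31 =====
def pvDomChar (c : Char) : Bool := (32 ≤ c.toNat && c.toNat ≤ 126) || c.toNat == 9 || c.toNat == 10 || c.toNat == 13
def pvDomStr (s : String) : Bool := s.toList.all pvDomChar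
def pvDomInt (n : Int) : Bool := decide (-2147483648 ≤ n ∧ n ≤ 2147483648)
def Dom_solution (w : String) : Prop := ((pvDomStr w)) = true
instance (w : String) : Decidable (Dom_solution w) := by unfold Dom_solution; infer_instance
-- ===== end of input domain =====

-- B replaces A's recursion by an iterative chunk collection followed by a back-to-front fold,
-- and checks perfectness by a running prefix sum instead of a stack (objective: alternative).

-- ===== PORT A =====
def bracketToInt (c : Char) : Int := if c = '(' then 1 else -1

def intToBracket (n : Int) : Char := if n = 1 then '(' else ')'

-- the 'for j in range(1, len(w))' loop of split_to_balanced: scan the tail, break when the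
-- running count hits zero; the prefix up to the break index is accumulated as we scan
def splitGo (uc : Int) : List Char → List Char × List Char
  | [] => ([], [])
  | c :: rest =>
    let uc' := uc + bracketToInt c
    if uc' = 0 then ([c], rest)
    else
      let p := splitGo uc' rest
      (c :: p.1, p.2)

def splitBal (cs : List Char) : List Char × List Char :=
  match cs with
  | [] => ([], [])
  | c :: rest =>
    let p := splitGo (bracketToInt c) rest
    (c :: p.1, p.2)

def checkGo (stack : List Int) : List Char → Bool
  | [] => true
  | c :: rest =>
    if bracketToInt c = 1 then checkGo (1 :: stack) rest
    else
      match stack with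
      | [] => false
      | _ :: stack' => checkGo stack' rest

-- result += int_to_bracket(-bracket_to_int(bracket))
def revAll (cs : List Char) : List Char :=
  cs.foldl (fun r c => r ++ [intToBracket (-1 * bracketToInt c)]) []

theorem splitGo_snd_len_le (uc : Int) (cs : List Char) :
    (splitGo uc cs).2.length ≤ cs.length := by
  induction cs generalizing uc with
  | nil => simp [splitGo]
  | cons c rest ih =>
    simp only [splitGo]
    split
    · simp
    · exact le_trans (ih _) (Nat.le_succ _)

theorem splitBal_snd_lt (cs : List Char) (h : cs ≠ []) :
    (splitBal cs).2.length < cs.length := by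
  cases cs with
  | nil => exact absurd rfl h
  | cons c rest =>
    simpa [splitBal] using Nat.lt_succ_of_le (splitGo_snd_len_le (bracketToInt c) rest)

def solutionList (cs : List Char) : List Char :=
  if h : cs = [] then []
  else
    let u := (splitBal cs).1
    let v := (splitBal cs).2
    if checkGo [] u then u ++ solutionList v
    else '(' :: (solutionList v ++ ')' :: revAll (PySem.List.slice u (some 1) (some (-1))))
termination_by cs.length
decreasing_by all_goals exact splitBal_snd_lt cs h

def solution (w : String) : String := String.mk (solutionList w.toList)

-- ===== PORT B =====
-- index search of B's inner 'for idx, ch in enumerate(w)' loop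
def spGo (idx : Nat) (total : Int) : List Char → Option Nat
  | [] => none
  | c :: rest =>
    let t := total + (if c = '(' then 1 else -1)
    if 1 ≤ idx ∧ t = 0 then some (idx + 1) else spGo (idx + 1) t rest

def kOf (cs : List Char) : Nat := (spGo 0 0 cs).getD cs.length

def perfGo (s : Int) : List Char → Bool
  | [] => true
  | c :: rest =>
    let s' := s + (if c = '(' then 1 else -1)
    if s' < 0 then false else perfGo s' rest

theorem spGo_some_gt (cs : List Char) : ∀ idx total k,
    spGo idx total cs = some k → idx < k := by
  induction cs with
  | nil => intro idx total k h; simp [spGo] at h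
  | cons c rest ih =>
    intro idx total k h
    simp only [spGo] at h
    by_cases hc : 1 ≤ idx ∧ total + (if c = '(' then 1 else -1) = 0
    · rw [if_pos hc] at h
      have := Option.some.inj h
      omega
    · rw [if_neg hc] at h
      exact Nat.lt_of_succ_lt (ih (idx + 1) _ k h)

theorem kOf_pos (cs : List Char) (h : cs ≠ []) : 1 ≤ kOf cs := by
  unfold kOf
  cases hk : spGo 0 0 cs with
  | none =>
    have := List.length_pos_iff.mpr h
    simp only [Option.getD_none]
    omega
  | some k => simpa using spGo_some_gt cs 0 0 k hk

def chunksB (cs : List Char) : List (List Char × Bool) :=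
  if h : cs = [] then []
  else (cs.take (kOf cs), perfGo 0 (cs.take (kOf cs))) :: chunksB (cs.drop (kOf cs))
termination_by cs.length
decreasing_by
  simp only [List.length_drop]
  have := kOf_pos cs h
  have : 1 ≤ cs.length := List.length_pos_iff.mpr h
  omega

def flipBracket (c : Char) : Char := if c = '(' then ')' else '('

def foldChunks (l : List (List Char × Bool)) : List Char :=
  l.foldr
    (fun up res =>
      if up.2 then up.1 ++ res
      else '(' :: (res ++ ')' :: (PySem.List.slice up.1 (some 1) (some (-1))).map flipBracket))
    []

def solution_alt (w : String) : String := String.mk (foldChunks (chunksB w.toList))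

-- ===== PRECONDITION & SPEC =====
def Spec_solution (w : String) (out : String) : Prop := out = solution_alt w
instance (w : String) (out : String) : Decidable (Spec_solution w out) := by unfold Spec_solution; infer_instance

-- ===== CLAIM (what is proved, stated in full; the proofs are below) =====
def Claim_equal_solution : Prop := ∀ (w : String), Dom_solution w → Spec_solution w (solution w)

-- ===== LEMMAS AND PROOFS =====

-- B's index search agrees with A's accumulating split
theorem splitGo_eq_spGo (cs : List Char) : ∀ idx uc, 1 ≤ idx →
    (match spGo idx uc cs with
     | some k => splitGo uc cs = (cs.take (k - idx), cs.drop (k - idx))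
     | none => splitGo uc cs = (cs, [])) := by
  induction cs with
  | nil => intro idx uc _; simp [spGo, splitGo]
  | cons c rest ih =>
    intro idx uc hidx
    simp only [spGo, splitGo]
    by_cases hz : uc + (if c = '(' then 1 else -1) = 0
    · simp only [hz, and_true, hidx, if_pos, bracketToInt, if_pos trivial]
      simp [bracketToInt, hz]
    · have hcond : ¬ (1 ≤ idx ∧ uc + (if c = '(' then 1 else -1) = 0) := by
        intro h; exact hz h.2
      rw [if_neg hcond]
      have := ih (idx + 1) (uc + (if c = '(' then 1 else -1)) (by omega)
      cases hk : spGo (idx + 1) (uc + (if c = '(' then 1 else -1)) rest with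
      | none =>
        rw [hk] at this
        simp [bracketToInt, hz, this]
      | some k =>
        rw [hk] at this
        have hgt : idx + 1 < k := spGo_some_gt rest (idx + 1) _ k hk
        have h1 : k - idx = (k - (idx + 1)) + 1 := by omega
        simp [bracketToInt, hz, this, h1]

theorem splitBal_eq_kOf (cs : List Char) (h : cs ≠ []) :
    splitBal cs = (cs.take (kOf cs), cs.drop (kOf cs)) := by
  cases cs with
  | nil => exact absurd rfl h
  | cons c rest =>
    have hstep : spGo 0 0 (c :: rest) = spGo 1 (if c = '(' then 1 else -1) rest := by
      simp [spGo]
    have := splitGo_eq_spGo rest 1 (if c = '(' then 1 else -1) (le_refl 1)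
    unfold kOf
    rw [hstep]
    cases hk : spGo 1 (if c = '(' then 1 else -1) rest with
    | none =>
      rw [hk] at this
      simp [splitBal, bracketToInt, this]
    | some k =>
      rw [hk] at this
      have hgt : 1 < k := spGo_some_gt rest 1 _ k hk
      have h1 : k = (k - 1) + 1 := by omega
      simp only [splitBal, bracketToInt, this, Option.getD_some]
      rw [h1]
      simp

-- A's stack check equals B's prefix-sum check (stack holds only 1's; its length is the sum)
theorem checkGo_eq_perfGo (cs : List Char) : ∀ stack : List Int,
    checkGo stack cs = perfGo (stack.length : Int) cs := by
  induction cs with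
  | nil => intro stack; simp [checkGo, perfGo]
  | cons c rest ih =>
    intro stack
    simp only [checkGo, perfGo, bracketToInt]
    by_cases hc : c = '('
    · have h1 : ((stack.length : Int) + 1 < 0) = False := by
        simp; omega
      simp [hc, ih (1 :: stack), h1]
    · simp only [hc, if_false]
      rw [if_neg (show ¬(-1 : Int) = 1 by norm_num)]
      cases stack with
      | nil => norm_num
      | cons x stack' =>
        have h2 : ((x :: stack').length : Int) + -1 = (stack'.length : Int) := by
          push_cast [List.length_cons]; ring
        rw [h2, if_neg (show ¬ ((stack'.length : Int) < 0) by omega)]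
        exact ih stack'

theorem revAll_eq_map (cs : List Char) : revAll cs = cs.map flipBracket := by
  have gen : ∀ acc, cs.foldl (fun r c => r ++ [intToBracket (-1 * bracketToInt c)]) acc
      = acc ++ cs.map flipBracket := by
    induction cs with
    | nil => intro acc; simp
    | cons c rest ih =>
      intro acc
      have hflip : intToBracket (-1 * bracketToInt c) = flipBracket c := by
        by_cases hc : c = '(' <;> simp [intToBracket, bracketToInt, flipBracket, hc]
      rw [List.foldl_cons, ih, hflip]
      simp
  unfold revAll
  rw [gen]
  simp

theorem solutionList_eq_foldChunks (cs : List Char) :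
    solutionList cs = foldChunks (chunksB cs) := by
  induction hn : cs.length using Nat.strong_induction_on generalizing cs with
  | _ n ih =>
  by_cases h : cs = []
  · simp [h, solutionList, chunksB, foldChunks]
  · have hsplit := splitBal_eq_kOf cs h
    have hvlen : (cs.drop (kOf cs)).length < cs.length := by
      have h1 := kOf_pos cs h
      have h2 : 1 ≤ cs.length := List.length_pos_iff.mpr h
      simp only [List.length_drop]; omega
    have hIH : solutionList (cs.drop (kOf cs)) = foldChunks (chunksB (cs.drop (kOf cs))) := by
      exact ih (cs.drop (kOf cs)).length (hn ▸ hvlen) _ rfl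
    rw [solutionList, chunksB]
    simp only [h, dif_neg, not_false_iff]
    rw [hsplit]
    simp only [foldChunks, List.foldr_cons]
    rw [checkGo_eq_perfGo, revAll_eq_map, hIH]
    simp [foldChunks]

-- ===== VERDICT (by name: the statement is the Claim_ definition above) =====
theorem solution_spec : Claim_equal_solution := by
  intro w _
  unfold Spec_solution solution solution_alt
  rw [solutionList_eq_foldChunks]
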